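-- pv_equiv track=rewrite | github.com/StanfordLegion/legion | tools/issues2csv.py | list_match
-- ===== SOURCE A (Python) =====
-- def list_match(mlist, vlist):
--     first = True
--     accept = True
--     for mterm in mlist.split(','):
--         if mterm.startswith('-'):
--             if mterm[1:] in vlist:
--                 accept = False
--         else:
--             if first:
--                 accept = False  # default is reject
--             if mterm in vlist:
--                 accept = True
--         first = False
--     return accept
-- ===== SOURCE B (Python) =====
-- def list_match(mlist, vlist):
--     # Last-match-wins reverse scan with early return; default from the first term.
--     terms = mlist.split(',')
--     for t in reversed(terms):
--         if t.startswith('-'):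
--             if t[1:] in vlist:
--                 return False
--         elif t in vlist:
--             return True
--     return terms[0].startswith('-')
-- ===== Notes on version B (the rewrite author's own statement) =====
-- stated objective: alternative
-- what changed: Replaces the forward fold with mutable first/accept flags by a reverse scan with early return on the last firing term, falling back to a default computed from the first term's sign.
import Mathlib
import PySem

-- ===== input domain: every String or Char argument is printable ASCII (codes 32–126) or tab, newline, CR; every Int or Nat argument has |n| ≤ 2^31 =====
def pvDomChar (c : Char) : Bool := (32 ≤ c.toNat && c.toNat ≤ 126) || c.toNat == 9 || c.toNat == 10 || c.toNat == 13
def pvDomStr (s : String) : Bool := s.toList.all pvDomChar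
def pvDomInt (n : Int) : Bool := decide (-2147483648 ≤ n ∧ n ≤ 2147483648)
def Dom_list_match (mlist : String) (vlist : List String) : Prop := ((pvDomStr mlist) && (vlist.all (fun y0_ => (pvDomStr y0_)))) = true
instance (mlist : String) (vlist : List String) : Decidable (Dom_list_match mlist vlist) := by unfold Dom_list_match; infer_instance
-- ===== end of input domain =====

-- B replaces A's forward fold with first/accept flags by a reverse scan with early
-- return plus a default taken from the first term's sign (objective: alternative).


-- ===== PORT A =====
-- one loop iteration of A: state = (first, accept)
def lmStep (vlist : List String) (st : Bool × Bool) (mterm : String) : Bool × Bool :=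
  if PySem.Str.startswith mterm "-" then
    (false, if (PySem.Str.slice mterm (some 1) none) ∈ vlist then false else st.2)
  else
    let acc1 := if st.1 then false else st.2   -- 'if first: accept = False'
    (false, if mterm ∈ vlist then true else acc1)

def list_match (mlist : String) (vlist : List String) : Bool :=
  match PySem.Str.split? mlist "," with
  | none => false   -- unreachable: the separator "," is non-empty
  | some terms => (terms.foldl (lmStep vlist) (true, true)).2

-- ===== PORT B =====
-- reverse scan with early return ('for t in reversed(terms): ... return ...')
def lmScan (vlist : List String) : List String → Option Bool
  | [] => none
  | t :: rest =>
    if PySem.Str.startswith t "-" then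
      if (PySem.Str.slice t (some 1) none) ∈ vlist then some false else lmScan vlist rest
    else if t ∈ vlist then some true else lmScan vlist rest

def list_match_alt (mlist : String) (vlist : List String) : Bool :=
  match PySem.Str.split? mlist "," with
  | none => false   -- unreachable: the separator "," is non-empty
  | some terms =>
    match lmScan vlist terms.reverse with
    | some b => b
    | none => PySem.Str.startswith (terms.headD "") "-"   -- terms[0] (split is never empty)

-- ===== PRECONDITION & SPEC =====
def Spec_list_match (mlist : String) (vlist : List String) (out : Bool) : Prop := out = list_match_alt mlist vlist
instance (mlist : String) (vlist : List String) (out : Bool) : Decidable (Spec_list_match mlist vlist out) := by unfold Spec_list_match; infer_instance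

-- ===== CLAIM (what is proved, stated in full; the proofs are below) =====
def Claim_equal_list_match : Prop := ∀ (mlist : String) (vlist : List String), Dom_list_match mlist vlist → Spec_list_match mlist vlist (list_match mlist vlist)

-- ===== LEMMAS AND PROOFS =====

-- after any iteration the 'first' flag is false
theorem lmStep_fst (vlist : List String) (st : Bool × Bool) (t : String) :
    (lmStep vlist st t).1 = false := by
  unfold lmStep; split_ifs <;> simp_all

theorem foldl_fst_of_false (vlist : List String) :
    ∀ (ts : List String) (st : Bool × Bool), st.1 = false →
      (ts.foldl (lmStep vlist) st).1 = false := by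
  intro ts
  induction ts with
  | nil => intro st h; simpa using h
  | cons t rest ih =>
    intro st _
    rw [List.foldl_cons]
    exact ih _ (lmStep_fst vlist st t)

theorem foldl_lmStep_fst (vlist : List String) (ts : List String) (st : Bool × Bool)
    (h : ts ≠ []) : (ts.foldl (lmStep vlist) st).1 = false := by
  cases ts with
  | nil => exact absurd rfl h
  | cons t rest =>
    rw [List.foldl_cons]
    exact foldl_fst_of_false vlist rest _ (lmStep_fst vlist st t)

theorem headD_append_of_ne_nil (ts : List String) (l : List String) (h : ts ≠ []) :
    (ts ++ l).headD "" = ts.headD "" := by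
  cases ts with
  | nil => exact absurd rfl h
  | cons a b => rfl

-- one step of A, on the accept component, once 'first' is false
theorem lmStep_snd (vlist : List String) (st : Bool × Bool) (t : String) (hf : st.1 = false) :
    (lmStep vlist st t).2 =
      if PySem.Str.startswith t "-" then
        (if PySem.Str.slice t (some 1) none ∈ vlist then false else st.2)
      else (if t ∈ vlist then true else st.2) := by
  unfold lmStep; rw [hf]; split_ifs <;> simp_all

-- the very first step of A (first = true): default is reject
theorem lmStep_snd_first (vlist : List String) (t : String) :
    (lmStep vlist (true, true) t).2 =
      if PySem.Str.startswith t "-" then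
        (if PySem.Str.slice t (some 1) none ∈ vlist then false else true)
      else (if t ∈ vlist then true else false) := by
  unfold lmStep; split_ifs <;> simp_all

-- the core correspondence: forward fold = reverse scan + first-term default
theorem fold_eq_scan (vlist : List String) :
    ∀ (ts : List String), ts ≠ [] →
      (ts.foldl (lmStep vlist) (true, true)).2 =
        (match lmScan vlist ts.reverse with
         | some b => b
         | none => PySem.Str.startswith (ts.headD "") "-") := by
  intro ts
  induction ts using List.reverseRecOn with
  | nil => intro h; exact absurd rfl h
  | append_singleton ts t ih =>
    intro _
    rw [List.foldl_append]
    by_cases hts : ts = []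
    · subst hts
      simp only [List.foldl_nil, List.foldl_cons, List.nil_append,
        List.reverse_cons, List.reverse_nil, List.headD]
      rw [lmStep_snd_first]
      split_ifs with h1 h2 h3 <;> simp_all [lmScan]
    · have hfst : (ts.foldl (lmStep vlist) (true, true)).1 = false :=
        foldl_lmStep_fst vlist ts (true, true) hts
      have hrev : (ts ++ [t]).reverse = t :: ts.reverse := by simp
      rw [hrev, headD_append_of_ne_nil ts [t] hts,
        show List.foldl (lmStep vlist) (ts.foldl (lmStep vlist) (true, true)) [t]
            = lmStep vlist (ts.foldl (lmStep vlist) (true, true)) t from rfl,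
        lmStep_snd vlist _ t hfst]
      split_ifs with h1 h2 h3 <;> simp_all [lmScan, ih hts]

-- the split of a non-empty separator is never the empty list
theorem splitOn_go_ne_nil (sep : List Char) :
    ∀ (fuel : Nat) (l cur : List Char) (acc : List (List Char)),
      PySem.Chars.splitOn.go sep fuel l cur acc ≠ [] := by
  intro fuel
  induction fuel with
  | zero => intro l cur acc; simp [PySem.Chars.splitOn.go]
  | succ n ih =>
    intro l cur acc
    cases l with
    | nil => simp [PySem.Chars.splitOn.go]
    | cons c rest =>
      rw [PySem.Chars.splitOn.go]
      split_ifs with h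
      · exact ih _ _ _
      · exact ih _ _ _

theorem split?_comma_ne_nil (s : String) (ts : List String)
    (h : PySem.Str.split? s "," = some ts) : ts ≠ [] := by
  unfold PySem.Str.split? PySem.Chars.split? at h
  simp only [List.isEmpty_iff] at h
  have hsep : ",".toList ≠ [] := by decide
  rw [if_neg hsep] at h
  simp only [Option.map_some, Option.some.injEq] at h
  subst h
  intro hnil
  rw [List.map_eq_nil_iff] at hnil
  exact splitOn_go_ne_nil _ _ _ _ _ hnil

-- ===== VERDICT (by name: the statement is the Claim_ definition above) =====
theorem list_match_spec : Claim_equal_list_match := by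
  intro mlist vlist _
  unfold Spec_list_match list_match list_match_alt
  cases h : PySem.Str.split? mlist "," with
  | none => rfl
  | some terms =>
    simpa using fold_eq_scan vlist terms (split?_comma_ne_nil mlist terms h)
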